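-- pv_equiv track=rewrite | github.com/alvarvankeppel/rsa | rsa.py | km
-- ===== SOURCE A (Python) =====
-- def km(n):
-- 	"""returns (k,m) that satisfies n-1 == 2^k * m"""
-- 	k = 0
-- 	m = n-1
-- 	q,r = divmod(m,2)
-- 	while r == 0:
-- 		k += 1
-- 		m = q
-- 		q,r = divmod(m,2)
-- 	return k,m
-- ===== SOURCE B (Python) =====
-- def km(n):
--     """returns (k,m) that satisfies n-1 == 2^k * m"""
--     v = n - 1
--     lsb = v & -v
--     k = lsb.bit_length() - 1
--     return k, v >> k
-- ===== Notes on version B (the rewrite author's own statement) =====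
-- stated objective: idiomatic
-- what changed: Replaces the repeated-divmod bit-stripping loop with a constant-step closed form: isolate the lowest set bit with v & -v, read k off its bit_length, and shift v right by k.
-- outside the precondition, e.g. on km(1): A does not finish within the time limit, B raises ValueError
import Mathlib
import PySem

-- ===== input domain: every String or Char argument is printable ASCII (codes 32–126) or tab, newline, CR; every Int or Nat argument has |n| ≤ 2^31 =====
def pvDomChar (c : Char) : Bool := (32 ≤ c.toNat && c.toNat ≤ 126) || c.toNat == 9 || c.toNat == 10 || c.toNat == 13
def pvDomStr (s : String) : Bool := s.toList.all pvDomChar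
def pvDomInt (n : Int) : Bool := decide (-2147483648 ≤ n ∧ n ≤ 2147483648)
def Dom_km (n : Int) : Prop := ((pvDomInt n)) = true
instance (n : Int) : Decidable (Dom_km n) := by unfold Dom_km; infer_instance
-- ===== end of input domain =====

-- B replaces A's divmod-stripping loop by the closed form lsb = v & -v, k = lsb.bit_length()-1, m = v >> k (idiomatic, constant number of bigint steps).

-- ===== PORT A =====
-- A's while loop: each iteration recomputes divmod(m,2); loops while the remainder is 0.
-- The fuel (|n-1| + 1) is a totality guard only: it strictly exceeds the number of
-- iterations whenever n ≠ 1 (proved below); for n = 1 the Python loop never terminates.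
def kmLoop : Nat → Int → Int → Int × Int
  | 0, k, m => (k, m)
  | fuel+1, k, m =>
    if PySem.Int.mod m 2 = 0 then kmLoop fuel (k+1) (PySem.Int.floordiv m 2) else (k, m)

def km (n : Int) : Int × Int :=
  kmLoop ((n-1).natAbs + 1) 0 (n-1)

-- ===== PORT B =====
-- v & -v → Int.land v (-v); lsb.bit_length() → PySem.Int.bitLength; v >> k with k ≥ 0
-- whenever n ≠ 1 (for n = 1 Python raises ValueError on the negative shift; that input
-- is outside Pre_km, and .toNat there is never relied upon).
def km_alt (n : Int) : Int × Int :=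
  let v := n - 1
  let lsb := Int.land v (-v)
  let k : Int := (PySem.Int.bitLength lsb : Int) - 1
  (k, v >>> k.toNat)

-- ===== PRECONDITION & SPEC =====
-- Pre_ excludes only n = 1, where A's while loop never terminates (m = 0 stays 0) and B raises ValueError.
def Pre_km (n : Int) : Prop := n ≠ 1
instance (n : Int) : Decidable (Pre_km n) := by unfold Pre_km; infer_instance
def pvWitness_km : Int := 13

def Spec_km (n : Int) (out : Int × Int) : Prop := out = km_alt n
instance (n : Int) (out : Int × Int) : Decidable (Spec_km n out) := by unfold Spec_km; infer_instance

-- ===== CLAIM (what is proved, stated in full; the proofs are below) =====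
def Claim_equal_km : Prop := ∀ (n : Int), Dom_km n → Pre_km n → Spec_km n (km n)

-- ===== LEMMAS AND PROOFS =====

-- bit 0 of an odd number is the only bit it does not share with its predecessor
theorem pv_ldiff_odd (o : Nat) (ho : o % 2 = 1) : Nat.ldiff o (o-1) = 1 := by
  apply Nat.eq_of_testBit_eq
  intro i
  cases i with
  | zero =>
    have h1 : (o - 1) % 2 = 0 := by omega
    rw [Nat.testBit_ldiff]
    simp [Nat.testBit_zero, ho, h1]
  | succ i =>
    have h : o / 2 = (o - 1) / 2 := by omega
    rw [Nat.testBit_ldiff, Nat.testBit_succ, Nat.testBit_succ, h]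
    simp [Nat.testBit_succ]

-- the key bit identity: for a = 2^t * o with o odd, a AND NOT (a-1) = 2^t
theorem pv_ldiff_two_pow_mul (t o : Nat) (ho : o % 2 = 1) :
    Nat.ldiff (2^t * o) (2^t * o - 1) = 2^t := by
  induction t with
  | zero => simpa using pv_ldiff_odd o ho
  | succ t ih =>
    have hb : 1 ≤ 2^t * o := Nat.mul_pos (Nat.two_pow_pos t) (by omega)
    have ha : 2^(t+1) * o = 2 * (2^t * o) := by ring
    apply Nat.eq_of_testBit_eq
    intro i
    cases i with
    | zero =>
      have h0 : (2 * (2^t * o)) % 2 = 0 := by omega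
      rw [Nat.testBit_ldiff, ha]
      simp [Nat.testBit_zero, h0]
    | succ i =>
      have h1 : 2 * (2^t * o) / 2 = 2^t * o := by omega
      have h2 : (2 * (2^t * o) - 1) / 2 = 2^t * o - 1 := by omega
      rw [Nat.testBit_ldiff, ha, Nat.testBit_succ, Nat.testBit_succ, h1, h2,
        ← Nat.testBit_ldiff, ih, Nat.testBit_two_pow, Nat.testBit_two_pow]
      simp

-- v & -v computed through Int.land is a Nat.ldiff of |v| and |v|-1, for either sign
theorem pv_land_neg_self (v : Int) (hv : v ≠ 0) :
    Int.land v (-v) = ((Nat.ldiff v.natAbs (v.natAbs - 1) : Nat) : Int) := by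
  match v with
  | Int.ofNat 0 => exact absurd rfl hv
  | Int.ofNat (m+1) => rfl
  | Int.negSucc m => rfl

-- every nonzero integer is 2^t times an odd integer, compatibly with natAbs
theorem pv_decomp (v : Int) (hv : v ≠ 0) :
    ∃ (t : Nat) (o : Int), o.natAbs % 2 = 1 ∧ v = 2^t * o ∧ v.natAbs = 2^t * o.natAbs := by
  obtain ⟨t, o', hnd, habs⟩ :=
    Nat.exists_eq_pow_mul_and_not_dvd (n := v.natAbs) (by simpa using hv) 2 (by omega)
  refine ⟨t, v.sign * (o' : Int), ?_, ?_, ?_⟩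
  · have hs : v.sign = 1 ∨ v.sign = -1 := by
      rcases Int.lt_or_lt_of_ne hv with h | h
      · right; exact Int.sign_eq_neg_one_of_neg h
      · left; exact Int.sign_eq_one_of_pos h
    rcases hs with h | h <;> simp [h] <;> omega
  · calc v = v.sign * (v.natAbs : Int) := (Int.sign_mul_natAbs v).symm
      _ = v.sign * ((2^t * o' : Nat) : Int) := by rw [habs]
      _ = 2^t * (v.sign * (o' : Int)) := by push_cast; ring
  · have hs : v.sign = 1 ∨ v.sign = -1 := by
      rcases Int.lt_or_lt_of_ne hv with h | h
      · right; exact Int.sign_eq_neg_one_of_neg h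
      · left; exact Int.sign_eq_one_of_pos h
    rcases hs with h | h <;> simp [h, habs]

-- A's loop strips exactly the t factors of two, adding t to the accumulator
theorem pv_kmLoop_eq (t : Nat) (o : Int) (ho : o % 2 = 1) :
    ∀ fuel k, t < fuel → kmLoop fuel k (2^t * o) = (k + (t : Int), o) := by
  induction t with
  | zero =>
    intro fuel k hf
    match fuel with
    | f + 1 =>
      have hm : PySem.Int.mod o 2 = 1 := by
        rw [PySem.Int.mod_eq_emod_of_pos (by omega)]; exact ho
      simp only [pow_zero, one_mul]
      simp only [kmLoop]
      rw [if_neg (by rw [hm]; omega)]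
      simp
  | succ t ih =>
    intro fuel k hf
    match fuel with
    | f + 1 =>
      have ha : (2:Int)^(t+1) * o = 2 * (2^t * o) := by ring
      have hm : PySem.Int.mod ((2:Int)^(t+1) * o) 2 = 0 := by
        rw [PySem.Int.mod_eq_emod_of_pos (by omega), ha]
        simp [Int.mul_emod_right]
      have hd : PySem.Int.floordiv ((2:Int)^(t+1) * o) 2 = 2^t * o := by
        rw [ha]; exact Int.mul_fdiv_cancel_left _ (by omega)
      simp only [kmLoop]
      rw [if_pos hm, hd, ih f (k+1) (by omega)]
      congr 1
      push_cast
      ring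

-- bit_length of a power of two
theorem pv_bitLength_two_pow (t : Nat) : PySem.Int.bitLength ((2^t : Nat) : Int) = t + 1 := by
  induction t with
  | zero => decide
  | succ t ih =>
    rw [PySem.Int.bitLength_natCast (by positivity)]
    have : 2^(t+1) / 2 = 2^t := by
      rw [pow_succ, Nat.mul_div_cancel _ (by omega)]
    rw [this, ih]

-- ===== VERDICT (by name: the statement is the Claim_ definition above) =====
theorem km_spec : Claim_equal_km := by
  intro n _ hpre
  unfold Spec_km
  set v : Int := n - 1 with hv
  have hv0 : v ≠ 0 := by simp only [Pre_km] at hpre; omega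
  obtain ⟨t, o, hodd, hvo, habs⟩ := pv_decomp v hv0
  have hoabs : o.natAbs ≠ 0 := by omega
  have ho : o % 2 = 1 := by
    rcases Int.emod_two_eq o with h | h
    · exfalso
      have : (2:Int) ∣ o := Int.dvd_of_emod_eq_zero h
      have : 2 ∣ o.natAbs := Int.natAbs_dvd_natAbs.mpr (by simpa using this)
      omega
    · exact h
  -- A's side
  have hfuel : t < v.natAbs + 1 := by
    have h1 : t < 2^t := Nat.lt_two_pow_self
    have h2 : 2^t ≤ 2^t * o.natAbs := Nat.le_mul_of_pos_right _ (by omega)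
    omega
  have hA : km n = ((t : Int), o) := by
    unfold km
    rw [← hv, hvo] at *
    rw [pv_kmLoop_eq t o ho _ 0 hfuel]
    simp
  -- B's side
  have hlsb : Int.land v (-v) = ((2^t : Nat) : Int) := by
    rw [pv_land_neg_self v hv0, habs, pv_ldiff_two_pow_mul t o.natAbs hodd]
  have hB : km_alt n = ((t : Int), o) := by
    unfold km_alt
    rw [← hv]
    simp only [hlsb, pv_bitLength_two_pow]
    have hk : ((t + 1 : Nat) : Int) - 1 = (t : Int) := by push_cast; ring
    rw [hk]
    have hsh : v >>> (t : Int).toNat = o := by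
      rw [Int.toNat_natCast, Int.shiftRight_eq_div_pow, hvo]
      push_cast
      exact Int.mul_ediv_cancel_left _ (by positivity)
    rw [hsh]
  rw [hA, hB]
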